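-- pv_equiv track=rewrite | github.com/diamondbuild/nba-dashboard | track_results.py | find_player_stat
-- ===== SOURCE A (Python) =====
-- def normalize_name(name):
--     """Normalize player name for matching"""
--     return name.lower().strip().replace('.', '').replace("'", '')
--
-- def find_player_stat(player_name, stat_type, player_stats):
--     """Find player stat with improved name matching"""
--     normalized_bet_name = normalize_name(player_name)
--
--     # Try exact match first
--     for stats_name, stats in player_stats.items():
--         if normalize_name(stats_name) == normalized_bet_name:
--             return stats.get(stat_type)
--
--     # Try partial match (both ways)
--     for stats_name, stats in player_stats.items():
--         normalized_stats_name = normalize_name(stats_name)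
--         if normalized_bet_name in normalized_stats_name or normalized_stats_name in normalized_bet_name:
--             return stats.get(stat_type)
--
--     # No match found
--     return None
-- ===== SOURCE B (Python) =====
-- def normalize_name(name):
--     """Normalize player name for matching"""
--     return name.lower().strip().replace('.', '').replace("'", '')
--
-- def find_player_stat(player_name, stat_type, player_stats):
--     """Single pass: exact match returns immediately; first partial match is
--     recorded (with a found-flag, since stats.get may be None) and used only
--     if no exact match exists anywhere."""
--     target = normalize_name(player_name)
--     found_partial = False
--     partial = None
--     for stats_name, stats in player_stats.items():
--         norm = normalize_name(stats_name)
--         if norm == target: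
--             return stats.get(stat_type)
--         if not found_partial and (target in norm or norm in target):
--             found_partial = True
--             partial = stats.get(stat_type)
--     return partial
-- ===== Notes on version B (the rewrite author's own statement) =====
-- stated objective: simpler
-- what changed: A scans the dict twice (one full pass for exact matches, then a second full pass for partial matches); B makes a single pass that normalizes each name once, returns immediately on an exact match and records the first partial candidate for use after the loop.
import Mathlib
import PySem

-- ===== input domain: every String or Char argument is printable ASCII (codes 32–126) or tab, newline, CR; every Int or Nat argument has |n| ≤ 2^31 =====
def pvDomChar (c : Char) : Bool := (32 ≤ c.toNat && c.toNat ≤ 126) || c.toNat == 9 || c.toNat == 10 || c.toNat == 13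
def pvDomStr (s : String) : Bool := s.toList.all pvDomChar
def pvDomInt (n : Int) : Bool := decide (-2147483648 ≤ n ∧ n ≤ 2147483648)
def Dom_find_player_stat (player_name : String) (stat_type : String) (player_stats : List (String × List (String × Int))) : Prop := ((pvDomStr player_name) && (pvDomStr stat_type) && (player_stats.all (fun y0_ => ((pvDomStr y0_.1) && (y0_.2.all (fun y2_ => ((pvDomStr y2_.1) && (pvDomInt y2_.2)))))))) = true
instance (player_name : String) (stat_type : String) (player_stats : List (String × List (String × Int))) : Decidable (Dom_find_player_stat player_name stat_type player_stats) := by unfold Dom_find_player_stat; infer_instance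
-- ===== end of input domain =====

-- B fuses A's two full scans into one pass that normalizes each name once,
-- returns on an exact match and records the first partial candidate (simpler; same cost class).

-- ===== PORT A =====
-- normalize_name: name.lower().strip().replace('.', '').replace("'", '')
def pvNormalize (name : String) : String :=
  PySem.Str.replace (PySem.Str.replace (PySem.Str.strip (PySem.Str.lower name)) "." "") "'" ""

-- first loop of A: exact match; `some r` = the loop returned r, `none` = fell through
def pvAExact (target stat : String) : List (String × List (String × Int)) → Option (Option Int)
  | [] => none
  | (stats_name, stats) :: rest =>
    if pvNormalize stats_name = target then some ((PySem.Dict.mk stats).get? stat)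
    else pvAExact target stat rest

-- second loop of A: partial match (both ways)
def pvAPartial (target stat : String) : List (String × List (String × Int)) → Option (Option Int)
  | [] => none
  | (stats_name, stats) :: rest =>
    let ns := pvNormalize stats_name
    if PySem.Str.isIn target ns || PySem.Str.isIn ns target then some ((PySem.Dict.mk stats).get? stat)
    else pvAPartial target stat rest

def find_player_stat (player_name : String) (stat_type : String) (player_stats : List (String × List (String × Int))) : Option Int :=
  let target := pvNormalize player_name
  match pvAExact target stat_type player_stats with
  | some r => r
  | none =>
    match pvAPartial target stat_type player_stats with
    | some r => r
    | none => none

-- ===== PORT B =====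
-- the single for-loop of B, state = (found_partial, partial)
def pvBLoop (target stat : String) (found : Bool) (partial_ : Option Int) :
    List (String × List (String × Int)) → Option Int
  | [] => partial_
  | (stats_name, stats) :: rest =>
    let norm := pvNormalize stats_name
    if norm = target then (PySem.Dict.mk stats).get? stat
    else if !found && (PySem.Str.isIn target norm || PySem.Str.isIn norm target) then
      pvBLoop target stat true ((PySem.Dict.mk stats).get? stat) rest
    else pvBLoop target stat found partial_ rest

def find_player_stat_alt (player_name : String) (stat_type : String) (player_stats : List (String × List (String × Int))) : Option Int :=
  pvBLoop (pvNormalize player_name) stat_type false none player_stats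

-- ===== PRECONDITION & SPEC =====
def Spec_find_player_stat (player_name : String) (stat_type : String) (player_stats : List (String × List (String × Int))) (out : Option Int) : Prop := out = find_player_stat_alt player_name stat_type player_stats
instance (player_name : String) (stat_type : String) (player_stats : List (String × List (String × Int))) (out : Option Int) : Decidable (Spec_find_player_stat player_name stat_type player_stats out) := by unfold Spec_find_player_stat; infer_instance

-- ===== CLAIM (what is proved, stated in full; the proofs are below) =====
def Claim_equal_find_player_stat : Prop := ∀ (player_name : String) (stat_type : String) (player_stats : List (String × List (String × Int))), Dom_find_player_stat player_name stat_type player_stats → Spec_find_player_stat player_name stat_type player_stats (find_player_stat player_name stat_type player_stats)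

-- ===== LEMMAS AND PROOFS =====

-- loop invariant: B's single pass equals A's first scan, falling back to the recorded
-- candidate if one was found, else to A's second scan.
-- loop invariant: B's single pass equals A's first scan, falling back to the recorded
-- candidate if one was found, else to A's second scan.
theorem pvBLoop_eq (target stat : String) (l : List (String × List (String × Int)))
    (found : Bool) (partial_ : Option Int) (hfp : found = false → partial_ = none) :
    pvBLoop target stat found partial_ l =
      (pvAExact target stat l).getD
        (if found then partial_ else (pvAPartial target stat l).getD none) := by
  induction l generalizing found partial_ with
  | nil =>
    cases found with
    | false => simp [pvBLoop, pvAExact, pvAPartial, hfp rfl]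
    | true => simp [pvBLoop, pvAExact]
  | cons hd tl ih =>
    obtain ⟨stats_name, stats⟩ := hd
    by_cases he : pvNormalize stats_name = target
    · simp only [pvBLoop, pvAExact, if_pos he, Option.getD_some]
    · by_cases hp : (PySem.Str.isIn target (pvNormalize stats_name)
          || PySem.Str.isIn (pvNormalize stats_name) target) = true
      · cases found with
        | false =>
          simp only [pvBLoop, pvAExact, pvAPartial, if_neg he, Bool.not_false, Bool.true_and,
            hp, if_true]
          rw [ih true _ (by simp)]
          simp
        | true =>
          simp only [pvBLoop, pvAExact, pvAPartial, if_neg he, Bool.not_true, Bool.false_and,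
            Bool.false_eq_true, if_false, if_pos hp]
          rw [ih true partial_ (by simp)]
          simp
      · have hX : (PySem.Str.isIn target (pvNormalize stats_name)
            || PySem.Str.isIn (pvNormalize stats_name) target) = false := eq_false_of_ne_true hp
        have hc : (!found && (PySem.Str.isIn target (pvNormalize stats_name)
            || PySem.Str.isIn (pvNormalize stats_name) target)) = false := by
          cases found <;> simp only [Bool.not_true, Bool.not_false, Bool.false_and,
            Bool.true_and, hX]
        simp only [pvBLoop, pvAExact, pvAPartial, if_neg he, if_neg hp, hc,
          Bool.false_eq_true, if_false]
        exact ih found partial_ hfp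

-- ===== VERDICT (by name: the statement is the Claim_ definition above) =====
-- A's two-scan fallback chain, written as the getD form the invariant produces
theorem pvMatch_getD (e p : Option (Option Int)) :
    (match e with
     | some r => r
     | none => match p with | some r => r | none => none) =
      e.getD (if (false : Bool) then none else p.getD none) := by
  cases e <;> cases p <;> rfl

theorem find_player_stat_spec : Claim_equal_find_player_stat := by
  intro player_name stat_type player_stats _
  unfold Spec_find_player_stat find_player_stat find_player_stat_alt
  rw [pvBLoop_eq _ _ _ _ _ (fun _ => rfl)]
  exact pvMatch_getD _ _
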